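-- pv_equiv track=rewrite | github.com/McDermott-Group/Analysis | projects/fluxNoise/python/noiselib.py | bin_dwell_times
-- ===== SOURCE A (Python) =====
-- def bin_dwell_times(o):
--      last_val = o[0]
--      count = 0
--      x0 = []
--      x1 = []
--      for v in o:
--          if v == last_val:
--              count += 1
--          else:
--              if last_val == 0:
--                  x0 += [count]
--              else:
--                  x1 += [count]
--              count = 1
--          last_val = v
--      return x0,x1
-- ===== SOURCE B (Python) =====
-- def bin_dwell_times(o):
--     # Phase 1: run-length encode o (each entry [value, length], current run last).
--     rr = []
--     for v in o:
--         if rr and rr[-1][0] == v: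
--             rr[-1][1] += 1
--         else:
--             rr.append([v, 1])
--     # Phase 2: dispatch every finished run; the final run is never emitted.
--     x0, x1 = [], []
--     for val, cnt in rr[:-1]:
--         (x0 if val == 0 else x1).append(cnt)
--     return x0, x1
-- ===== Notes on version B (the rewrite author's own statement) =====
-- stated objective: alternative
-- what changed: Replaces A's last_val/count state machine by a two-phase pass: build a run-length encoding of o, then dispatch every run except the final one to x0/x1 by its value.
-- outside the precondition, e.g. on bin_dwell_times([]): A raises IndexError, B returns ([], [])
import Mathlib
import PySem

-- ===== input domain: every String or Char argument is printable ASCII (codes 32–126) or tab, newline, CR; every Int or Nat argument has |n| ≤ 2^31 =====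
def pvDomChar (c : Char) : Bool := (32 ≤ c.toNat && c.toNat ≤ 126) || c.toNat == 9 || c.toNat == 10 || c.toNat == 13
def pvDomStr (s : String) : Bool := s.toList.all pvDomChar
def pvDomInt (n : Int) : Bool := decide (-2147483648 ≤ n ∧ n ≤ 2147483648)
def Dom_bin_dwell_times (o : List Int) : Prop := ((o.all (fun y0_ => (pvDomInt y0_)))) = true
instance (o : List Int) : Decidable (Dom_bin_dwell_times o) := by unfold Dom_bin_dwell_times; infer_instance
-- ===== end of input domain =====

-- B replaces A's last_val/count state machine by a two-phase pass (run-length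
-- encode, then dispatch all but the final run); equal cost, different structure.
-- A raises IndexError on [] (the only input Pre_ excludes); B returns ([], []) there.

-- ===== PORT A =====
-- one iteration of A's for-loop over state (last_val, count, x0, x1)
def pvAstep (st : Int × Int × List Int × List Int) (v : Int) : Int × Int × List Int × List Int :=
  if v == st.1 then (v, st.2.1 + 1, st.2.2.1, st.2.2.2)
  else if st.1 == 0 then (v, 1, st.2.2.1 ++ [st.2.1], st.2.2.2)
  else (v, 1, st.2.2.1, st.2.2.2 ++ [st.2.1])

def bin_dwell_times (o : List Int) : List Int × List Int :=
  match o with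
  | [] => ([], [])  -- unreachable under Pre_: Python raises IndexError at o[0]
  | h :: _ =>
    let s := o.foldl pvAstep (h, 0, [], [])
    (s.2.2.1, s.2.2.2)

-- ===== PORT B =====
-- phase 1 step: rr is ported with the CURRENT run at the HEAD (Python keeps it
-- at the tail for O(1) append), hence the .reverse before phase 2
def pvRLEstep (acc : List (Int × Int)) (v : Int) : List (Int × Int) :=
  match acc with
  | (w, c) :: t => if w == v then (w, c + 1) :: t else (v, 1) :: (w, c) :: t
  | [] => [(v, 1)]

-- phase 2 step: dispatch one finished run (val, cnt) to x0 or x1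
def pvDispatch (p : List Int × List Int) (vc : Int × Int) : List Int × List Int :=
  if vc.1 == 0 then (p.1 ++ [vc.2], p.2) else (p.1, p.2 ++ [vc.2])

def bin_dwell_times_alt (o : List Int) : List Int × List Int :=
  let rr := (o.foldl pvRLEstep []).reverse
  rr.dropLast.foldl pvDispatch ([], [])

-- ===== PRECONDITION & SPEC =====
-- Pre_ excludes exactly the inputs where A raises (IndexError at o[0]): o = []
def Pre_bin_dwell_times (o : List Int) : Prop := o ≠ []
instance (o : List Int) : Decidable (Pre_bin_dwell_times o) := by unfold Pre_bin_dwell_times; infer_instance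
def pvWitness_bin_dwell_times : List Int := [0, 0, 1, 0]


def Spec_bin_dwell_times (o : List Int) (out : List Int × List Int) : Prop := out = bin_dwell_times_alt o
instance (o : List Int) (out : List Int × List Int) : Decidable (Spec_bin_dwell_times o out) := by unfold Spec_bin_dwell_times; infer_instance

-- ===== CLAIM (what is proved, stated in full; the proofs are below) =====
def Claim_equal_bin_dwell_times : Prop := ∀ (o : List Int), Dom_bin_dwell_times o → Pre_bin_dwell_times o → Spec_bin_dwell_times o (bin_dwell_times o)

-- ===== LEMMAS AND PROOFS =====

-- merge a run (w, c) onto the front of a run list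
def pvMerge (w c : Int) (rs : List (Int × Int)) : List (Int × Int) :=
  match rs with
  | (v, d) :: rs' => if v == w then (w, c + d) :: rs' else (w, c) :: (v, d) :: rs'
  | [] => [(w, c)]

-- run-length encoding, oldest run first (proof-side characterisation)
def pvRLE (l : List Int) : List (Int × Int) := l.foldr (fun v rs => pvMerge v 1 rs) []

-- consume a run list, merging the first run into (last, count) if values match
def pvE (last count : Int) (x0 x1 : List Int) : List (Int × Int) → List Int × List Int
  | [] => (x0, x1)
  | (v, c) :: rs =>
    if v == last then pvE v (count + c) x0 x1 rs
    else if last == 0 then pvE v c (x0 ++ [count]) x1 rs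
    else pvE v c x0 (x1 ++ [count]) rs

lemma pvRLE_cons (v : Int) (t : List Int) : pvRLE (v :: t) = pvMerge v 1 (pvRLE t) := rfl

lemma foldl_RLEstep (t : List Int) : ∀ (w c : Int) (a : List (Int × Int)),
    List.foldl pvRLEstep ((w, c) :: a) t = (pvMerge w c (pvRLE t)).reverse ++ a := by
  induction t with
  | nil => intro w c a; simp [pvRLE, pvMerge]
  | cons v t' ih =>
    intro w c a
    rw [pvRLE_cons]
    simp only [List.foldl_cons, pvRLEstep]
    by_cases hv : w = v
    · subst hv
      simp only [beq_self_eq_true, if_true, ih]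
      cases hR : pvRLE t' with
      | nil => simp [pvMerge]
      | cons ud rs =>
        obtain ⟨u, d⟩ := ud
        by_cases hu : u = w
        · subst hu
          simp only [pvMerge, beq_self_eq_true, if_true]
          have : c + (1 + d) = c + 1 + d := by ring
          rw [this]
        · simp [pvMerge, hu]
    · rw [if_neg (by simpa using hv), ih]
      cases hR : pvRLE t' with
      | nil => simp [pvMerge, Ne.symm hv]
      | cons ud rs =>
        obtain ⟨u, d⟩ := ud
        by_cases hu : u = v
        · subst hu
          simp [pvMerge, Ne.symm hv]
        · simp [pvMerge, Ne.symm hv, hu]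

lemma foldl_RLEstep_nil (o : List Int) :
    List.foldl pvRLEstep [] o = (pvRLE o).reverse := by
  cases o with
  | nil => rfl
  | cons h t =>
    simp only [List.foldl_cons, pvRLEstep, pvRLE_cons]
    rw [foldl_RLEstep, List.append_nil]

-- A's loop, reformulated over the run-length encoding of the remaining input
lemma foldl_Astep (t : List Int) : ∀ (last count : Int) (x0 x1 : List Int),
    ((List.foldl pvAstep (last, count, x0, x1) t).2.2.1,
     (List.foldl pvAstep (last, count, x0, x1) t).2.2.2)
      = pvE last count x0 x1 (pvRLE t) := by
  induction t with
  | nil => intro last count x0 x1; simp [pvRLE, pvE]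
  | cons v t' ih =>
    intro last count x0 x1
    rw [pvRLE_cons]
    simp only [List.foldl_cons, pvAstep]
    by_cases hv : v = last
    · subst hv
      simp only [beq_self_eq_true, if_true, ih]
      cases hR : pvRLE t' with
      | nil => simp [pvMerge, pvE]
      | cons ud rs =>
        obtain ⟨u, d⟩ := ud
        by_cases hu : u = v
        · subst hu
          simp only [pvMerge, beq_self_eq_true, if_true, pvE]
          have : count + (1 + d) = count + 1 + d := by ring
          rw [this]
        · simp [pvMerge, hu, pvE]
    · rw [if_neg (by simpa using hv)]
      by_cases h0 : last = 0
      · subst h0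
        simp only [beq_self_eq_true, if_true, ih]
        cases hR : pvRLE t' with
        | nil => simp [pvMerge, pvE, hv]
        | cons ud rs =>
          obtain ⟨u, d⟩ := ud
          by_cases hu : u = v
          · subst hu; simp [pvMerge, pvE, hv]
          · simp [pvMerge, pvE, hv, hu]
      · rw [if_neg (by simpa using h0), ih]
        cases hR : pvRLE t' with
        | nil => simp [pvMerge, pvE, hv, h0]
        | cons ud rs =>
          obtain ⟨u, d⟩ := ud
          by_cases hu : u = v
          · subst hu; simp [pvMerge, pvE, hv, h0]
          · simp [pvMerge, pvE, hv, h0, hu]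

-- adjacent runs of an RLE carry distinct values
lemma pvRLE_chain (l : List Int) : List.IsChain (fun a b : Int × Int => a.1 ≠ b.1) (pvRLE l) := by
  induction l with
  | nil => exact List.isChain_nil
  | cons v t ih =>
    rw [pvRLE_cons]
    cases hR : pvRLE t with
    | nil => simp only [pvMerge]; exact List.isChain_singleton _
    | cons ud rs =>
      obtain ⟨u, d⟩ := ud
      rw [hR] at ih
      by_cases hu : u = v
      · subst hu
        simp only [pvMerge, beq_self_eq_true, if_true]
        cases rs with
        | nil => exact List.isChain_singleton _
        | cons x rs' =>
          rw [List.isChain_cons_cons] at ih ⊢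
          exact ⟨ih.1, ih.2⟩
      · have : (u == v) = false := by simpa using hu
        simp only [pvMerge, this, Bool.false_eq_true, if_false]
        exact List.isChain_cons_cons.mpr ⟨by simpa using Ne.symm hu, ih⟩

lemma pvRLE_head (v : Int) (t : List Int) : ∃ c rs, pvRLE (v :: t) = (v, c) :: rs := by
  rw [pvRLE_cons]
  cases pvRLE t with
  | nil => exact ⟨1, [], rfl⟩
  | cons ud rs =>
    obtain ⟨u, d⟩ := ud
    by_cases hu : u = v
    · exact ⟨1 + d, rs, by simp [pvMerge, hu]⟩
    · exact ⟨1, (u, d) :: rs, by simp [pvMerge, hu]⟩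

-- consuming a chained run list = dispatching all but the last run
lemma pvE_dispatch (rs : List (Int × Int)) : ∀ (last count : Int) (x0 x1 : List Int),
    List.IsChain (fun a b : Int × Int => a.1 ≠ b.1) ((last, count) :: rs) →
    pvE last count x0 x1 rs = List.foldl pvDispatch (x0, x1) ((last, count) :: rs).dropLast := by
  induction rs with
  | nil => intro last count x0 x1 _; simp [pvE]
  | cons vc rs' ih =>
    intro last count x0 x1 hch
    obtain ⟨v, c⟩ := vc
    have hvl : v ≠ last := by
      have := (List.isChain_cons_cons.mp hch).1; simpa using Ne.symm this
    have hch' : List.IsChain (fun a b : Int × Int => a.1 ≠ b.1) ((v, c) :: rs') :=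
      (List.isChain_cons_cons.mp hch).2
    have hdl : ((last, count) :: (v, c) :: rs').dropLast
        = (last, count) :: ((v, c) :: rs').dropLast := by
      simp [List.dropLast]
    rw [hdl, List.foldl_cons]
    have hb : (v == last) = false := by simpa using hvl
    by_cases h0 : last = 0
    · subst h0
      simp only [pvE, hb, Bool.false_eq_true, if_false, beq_self_eq_true, if_true]
      rw [ih v c (x0 ++ [count]) x1 hch']
      simp [pvDispatch]
    · have hb0 : (last == 0) = false := by simpa using h0
      simp only [pvE, hb, hb0, Bool.false_eq_true, if_false]
      rw [ih v c x0 (x1 ++ [count]) hch']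
      simp [pvDispatch, h0]

-- ===== VERDICT (by name: the statement is the Claim_ definition above) =====
theorem bin_dwell_times_spec : Claim_equal_bin_dwell_times := by
  intro o _ hpre
  unfold Spec_bin_dwell_times
  cases o with
  | nil => exact absurd rfl hpre
  | cons h t =>
    show bin_dwell_times (h :: t) = bin_dwell_times_alt (h :: t)
    obtain ⟨c, rs, hR⟩ := pvRLE_head h t
    have hch := pvRLE_chain (h :: t)
    rw [hR] at hch
    unfold bin_dwell_times bin_dwell_times_alt
    rw [foldl_RLEstep_nil, List.reverse_reverse]
    simp only
    rw [foldl_Astep (h :: t) h 0 [] [], hR]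
    simp only [pvE, beq_self_eq_true, if_true, zero_add]
    exact pvE_dispatch rs h c [] [] hch
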